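-- pv_equiv track=rewrite | github.com/sangam92/https---github.com-sangam92-data_structure | smaller_than_current_number.py | smallerthancurrent
-- ===== SOURCE A (Python) =====
-- def smallerthancurrent(nums):
--     final_op =[]
--     for i in nums:
--         count=0
--         for j in nums:
--
--             if i > j:
--                 count = count + 1
--         final_op.append(count)
--     return final_op
-- ===== SOURCE B (Python) =====
-- def smallerthancurrent(nums):
--     s = sorted(nums)
--     rank = {}
--     for i, v in enumerate(s):
--         if v not in rank:
--             rank[v] = i
--     return [rank[x] for x in nums]
-- ===== Notes on version B (the rewrite author's own statement) =====
-- stated objective: faster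
-- what changed: Replaces the quadratic nested count loop by sorting a copy once and reading each element's strictly-smaller count as the first-occurrence index of that value in the sorted list (precomputed in one pass into a dict).
import Mathlib
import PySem

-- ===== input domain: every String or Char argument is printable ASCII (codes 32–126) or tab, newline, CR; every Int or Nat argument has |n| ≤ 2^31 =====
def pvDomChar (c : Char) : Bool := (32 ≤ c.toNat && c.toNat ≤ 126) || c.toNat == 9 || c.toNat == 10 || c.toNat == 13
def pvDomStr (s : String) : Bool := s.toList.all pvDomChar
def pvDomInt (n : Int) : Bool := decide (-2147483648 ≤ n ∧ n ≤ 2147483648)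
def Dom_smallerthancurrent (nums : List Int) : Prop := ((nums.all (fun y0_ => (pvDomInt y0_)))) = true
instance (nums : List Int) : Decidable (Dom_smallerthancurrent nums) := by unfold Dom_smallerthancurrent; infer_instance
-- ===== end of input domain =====

-- B sorts a copy once and reads each element's strictly-smaller count off the sorted list
-- (first-occurrence index, precomputed into a dict), replacing A's quadratic nested loop.

-- ===== PORT A =====
-- for i in nums: count = 0; for j in nums: if i > j: count += 1; final_op.append(count)
def smallerthancurrent (nums : List Int) : List Int :=
  nums.foldl
    (fun final_op i =>
      final_op ++ [nums.foldl (fun count j => if i > j then count + 1 else count) (0 : Int)])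
    []

-- ===== PORT B =====
-- s = sorted(nums); rank = {}; for i, v in enumerate(s): if v not in rank: rank[v] = i;
-- return [rank[x] for x in nums]
def smallerthancurrent_alt (nums : List Int) : List Int :=
  let s := PySem.List.sorted nums (fun x => x) false
  let rank := (PySem.List.enumerate s 0).foldl
    (fun d (p : Int × Int) => if d.contains p.2 then d else d.insert p.2 p.1)
    (PySem.Dict.empty)
  -- rank[x]: every x ∈ nums occurs in s, so the key is always present (getD's default is dead)
  nums.map (fun x => (rank.get? x).getD 0)

-- ===== PRECONDITION & SPEC =====
def Spec_smallerthancurrent (nums : List Int) (out : List Int) : Prop := out = smallerthancurrent_alt nums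
instance (nums : List Int) (out : List Int) : Decidable (Spec_smallerthancurrent nums out) := by unfold Spec_smallerthancurrent; infer_instance

-- ===== CLAIM (what is proved, stated in full; the proofs are below) =====
def Claim_equal_smallerthancurrent : Prop := ∀ (nums : List Int), Dom_smallerthancurrent nums → Spec_smallerthancurrent nums (smallerthancurrent nums)

-- ===== LEMMAS AND PROOFS =====

-- B's rank dict, built over enumerate s with "insert only if absent", looked up at x:
-- the first-occurrence index of x in s (offset by the enumerate start k), else the prior binding.
theorem rank_fold_get (s : List Int) (k : Int) (d : PySem.Dict Int Int) (x : Int) :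
    (((PySem.List.enumerate s k).foldl
        (fun d (p : Int × Int) => if d.contains p.2 then d else d.insert p.2 p.1) d).get? x)
    = if d.contains x then d.get? x
      else (PySem.List.index? s x).map (fun n => k + (n : Int)) := by
  induction s generalizing k d with
  | nil =>
    rw [PySem.List.enumerate_nil]
    simp only [List.foldl_nil]
    split_ifs with h
    · rfl
    · simp only [Bool.not_eq_true] at h
      simp [(PySem.Dict.get?_eq_none_iff_contains d x).mpr h]
  | cons a t ih =>
    rw [PySem.List.enumerate_cons, List.foldl_cons]
    by_cases hx : x = a
    · subst hx
      rw [PySem.List.index?_cons_self]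
      by_cases hc : d.contains x = true
      · rw [if_pos hc, ih, if_pos hc, if_pos hc]
      · simp only [Bool.not_eq_true] at hc
        rw [if_neg (by simp [hc]), ih, if_pos (PySem.Dict.contains_insert_self d x k),
          PySem.Dict.get?_insert_self, if_neg (by simp [hc])]
        simp
    · have hRHS : PySem.List.index? (a :: t) x = (PySem.List.index? t x).map (· + 1) :=
        PySem.List.index?_cons_of_ne t (fun h => hx h.symm)
      rw [hRHS]
      by_cases hc : d.contains a = true
      · rw [if_pos hc, ih]
        cases PySem.List.index? t x with
        | none => rfl
        | some n =>
          by_cases hdx : d.contains x = true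
          · simp [hdx]
          · simp only [Bool.not_eq_true] at hdx
            simp only [hdx, Bool.false_eq_true, if_false]
            show some (k + 1 + (n : Int)) = some (k + ((n + 1 : Nat) : Int))
            rw [Option.some.injEq]
            push_cast
            ring
      · simp only [Bool.not_eq_true] at hc
        rw [if_neg (by simp [hc]), ih]
        have hcontains : (d.insert a k).contains x = d.contains x := by
          rw [PySem.Dict.contains_insert]
          simp [hx]
        rw [hcontains, PySem.Dict.get?_insert_of_ne _ _ hx]
        cases PySem.List.index? t x with
        | none => simp
        | some n =>
          by_cases hdx : d.contains x = true
          · simp [hdx]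
          · simp only [Bool.not_eq_true] at hdx
            simp only [hdx, Bool.false_eq_true, if_false]
            show some (k + 1 + (n : Int)) = some (k + ((n + 1 : Nat) : Int))
            rw [Option.some.injEq]
            push_cast
            ring

-- In a ≤-sorted list, the index of the first occurrence of a member x
-- is the number of elements strictly below x.
theorem index?_sorted_eq_countP (s : List Int) (hp : s.Pairwise (· ≤ ·)) (x : Int)
    (hx : x ∈ s) :
    PySem.List.index? s x = some (s.countP (fun y => decide (y < x))) := by
  induction s with
  | nil => cases hx
  | cons a t ih =>
    rcases List.pairwise_cons.mp hp with ⟨ha, hpt⟩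
    by_cases hax : a = x
    · subst hax
      rw [PySem.List.index?_cons_self]
      have h0 : (a :: t).countP (fun y => decide (y < a)) = 0 := by
        rw [List.countP_eq_zero]
        intro y hy
        rcases List.mem_cons.mp hy with h | h
        · simp [h]
        · have := ha y h; simp; omega
      rw [h0]
    · have hxt : x ∈ t := by
        rcases List.mem_cons.mp hx with h | h
        · exact absurd h.symm hax
        · exact h
      rw [PySem.List.index?_cons_of_ne t hax, ih hpt hxt]
      have hax' : a < x := lt_of_le_of_ne (ha x hxt) hax
      rw [List.countP_cons]
      simp [hax']

-- A's inner loop is a countP of "strictly smaller than i".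
theorem inner_count (nums : List Int) (i : Int) :
    nums.foldl (fun count j => if i > j then count + 1 else count) (0 : Int)
      = (nums.countP (fun j => decide (j < i)) : Int) := by
  have := PySem.List.foldl_count_if (fun j => decide (j < i)) nums 0
  simpa using this

-- ===== VERDICT (by name: the statement is the Claim_ definition above) =====
theorem smallerthancurrent_spec : Claim_equal_smallerthancurrent := by
  intro nums _
  unfold Spec_smallerthancurrent smallerthancurrent smallerthancurrent_alt
  rw [PySem.List.foldl_append_singleton_eq_map]
  simp only [List.nil_append]
  apply List.map_congr_left
  intro x hx
  rw [inner_count]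
  rw [rank_fold_get]
  have hxs : x ∈ PySem.List.sorted nums (fun x => x) false :=
    (PySem.List.mem_sorted nums (fun x => x) false x).mpr hx
  rw [if_neg (by simp)]
  rw [index?_sorted_eq_countP _ (by simpa using PySem.List.sorted_pairwise nums (fun x => x)) x hxs]
  have hperm : (PySem.List.sorted nums (fun x => x) false).Perm nums :=
    PySem.List.sorted_perm nums (fun x => x) false
  rw [hperm.countP_eq]
  simp
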